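-- pv_equiv track=rewrite | github.com/SylvainRoy/photographer | tools.py | selections_of_five_summits
-- ===== SOURCE A (Python) =====
-- def selections_of_five_summits(summits):
--     """
--     Return all combination of indexes of 5 summits.
--     """
--     out = []
--     ll = len(summits)
--     for i in range(0, ll - 4):
--         for j in range(i + 1, ll - 3):
--             for k in range(j + 1, ll - 2):
--                 for l in range(k + 1, ll - 1):
--                     for m in range(l + 1, ll):
--                         out.append([i, j, k, l, m])
--     return out
-- ===== SOURCE B (Python) =====
-- def selections_of_five_summits(summits):
--     """
--     Return all combination of indexes of 5 summits.
--     """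
--     ll = len(summits)
--
--     def choose(start, remaining):
--         if remaining == 0:
--             return [[]]
--         return [[i] + rest
--                 for i in range(start, ll - remaining + 1)
--                 for rest in choose(i + 1, remaining - 1)]
--
--     return choose(0, 5)
-- ===== Notes on version B (the rewrite author's own statement) =====
-- stated objective: simpler
-- what changed: Replaces the five hard-coded nested index loops by one recursive choose(start, remaining) helper that builds k-combinations generically and is called with k = 5.
import Mathlib
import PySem

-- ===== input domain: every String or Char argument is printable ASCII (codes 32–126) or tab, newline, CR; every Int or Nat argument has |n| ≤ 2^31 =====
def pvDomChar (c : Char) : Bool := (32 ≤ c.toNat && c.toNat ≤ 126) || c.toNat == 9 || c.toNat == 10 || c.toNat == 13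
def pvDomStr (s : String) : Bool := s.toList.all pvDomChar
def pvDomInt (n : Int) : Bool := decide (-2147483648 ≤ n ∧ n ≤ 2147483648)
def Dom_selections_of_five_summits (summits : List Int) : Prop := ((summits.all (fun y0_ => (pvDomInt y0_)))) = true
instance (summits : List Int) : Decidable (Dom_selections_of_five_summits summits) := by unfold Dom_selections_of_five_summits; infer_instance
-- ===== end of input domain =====

-- ===== PORT A =====
def selections_of_five_summits (summits : List Int) : List (List Int) :=
  let ll : Int := summits.length
  (PySem.List.pyRange 0 (ll - 4) 1).foldl (fun out i =>
    (PySem.List.pyRange (i + 1) (ll - 3) 1).foldl (fun out j =>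
      (PySem.List.pyRange (j + 1) (ll - 2) 1).foldl (fun out k =>
        (PySem.List.pyRange (k + 1) (ll - 1) 1).foldl (fun out l =>
          (PySem.List.pyRange (l + 1) ll 1).foldl (fun out m =>
            out ++ [[i, j, k, l, m]]) out) out) out) out) []

-- ===== PORT B =====
-- recursive helper: all ways to pick `remaining` increasing indices from range(start, ll)
def pvChoose (ll : Int) : Nat → Int → List (List Int)
  | 0, _ => [[]]
  | n + 1, start =>
      (PySem.List.pyRange start (ll - (n + 1 : Nat) + 1) 1).flatMap (fun i =>
        (pvChoose ll n (i + 1)).map (fun rest => i :: rest))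

def selections_of_five_summits_alt (summits : List Int) : List (List Int) :=
  pvChoose (summits.length : Int) 5 0

-- ===== PRECONDITION & SPEC =====
def Spec_selections_of_five_summits (summits : List Int) (out : List (List Int)) : Prop := out = selections_of_five_summits_alt summits
instance (summits : List Int) (out : List (List Int)) : Decidable (Spec_selections_of_five_summits summits out) := by unfold Spec_selections_of_five_summits; infer_instance

-- ===== CLAIM (what is proved, stated in full; the proofs are below) =====
def Claim_equal_selections_of_five_summits : Prop := ∀ (summits : List Int), Dom_selections_of_five_summits summits → Spec_selections_of_five_summits summits (selections_of_five_summits summits)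

-- ===== LEMMAS AND PROOFS =====

-- ===== VERDICT (by name: the statement is the Claim_ definition above) =====
theorem selections_of_five_summits_spec : Claim_equal_selections_of_five_summits := by
  intro summits _
  unfold Spec_selections_of_five_summits selections_of_five_summits selections_of_five_summits_alt
  simp only [pvChoose, PySem.List.foldl_append_eq_flatMap, List.nil_append,
    List.map_flatMap, List.map_cons, List.map_nil]
  ring_nf
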